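-- pv_equiv track=rewrite | github.com/excitedstate/DeepO | src/parse_query_plan.py | operators_generator
-- ===== SOURCE A (Python) =====
-- def operators_generator(_content):
--     _temp = list()
--     for _line in _content.split("\n"):
--         if '->' in _line:
--             yield '\n'.join(_temp)
--             _temp = [_line]
--         else:
--             _temp.append(_line)
--     yield '\n'.join(_temp)
-- ===== SOURCE B (Python) =====
-- def operators_generator(_content):
--     lines = _content.split("\n")
--     # leading chunk: the lines before the first '->' marker
--     k = 0
--     while k < len(lines) and '->' not in lines[k]:
--         k += 1
--     yield '\n'.join(lines[:k])
--     rest = lines[k:]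
--     # each remaining chunk starts at a marker line and runs to just before the next one
--     while rest:
--         tail = rest[1:]
--         k = 0
--         while k < len(tail) and '->' not in tail[k]:
--             k += 1
--         yield '\n'.join(rest[:k + 1])
--         rest = tail[k:]
-- ===== Notes on version B (the rewrite author's own statement) =====
-- stated objective: alternative
-- what changed: Replaced A's accumulate-and-flush pass (a growing temp buffer flushed at each '->' line) by a segment-splitting scan: advance to the next marker with takeWhile-style scans and yield each slice directly, so no per-line buffer is maintained.
import Mathlib
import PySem

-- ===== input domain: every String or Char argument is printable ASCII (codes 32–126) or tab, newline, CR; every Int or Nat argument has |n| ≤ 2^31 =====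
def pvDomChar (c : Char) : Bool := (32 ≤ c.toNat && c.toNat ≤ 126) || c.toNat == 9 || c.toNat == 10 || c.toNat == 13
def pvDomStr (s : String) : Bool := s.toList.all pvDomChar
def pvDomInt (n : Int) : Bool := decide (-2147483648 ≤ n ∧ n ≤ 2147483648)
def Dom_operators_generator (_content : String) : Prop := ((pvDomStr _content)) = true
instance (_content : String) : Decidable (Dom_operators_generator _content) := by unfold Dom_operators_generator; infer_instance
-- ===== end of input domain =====

-- B replaces A's accumulate-and-flush buffer by direct marker-to-marker segment scans; same cost, different decomposition.

-- ===== PORT A =====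
-- state: (temp, out); yields collected into out in order
def oaStep (st : List String × List String) (line : String) : List String × List String :=
  if PySem.Str.isIn "->" line then ([line], st.2 ++ [PySem.Str.join "\n" st.1])
  else (st.1 ++ [line], st.2)

def operators_generator (_content : String) : List String :=
  let st := ((PySem.Str.split? _content "\n").getD []).foldl oaStep ([], [])
  st.2 ++ [PySem.Str.join "\n" st.1]

-- ===== PORT B =====
def obNoMarker (s : String) : Bool := !PySem.Str.isIn "->" s

-- the inner while loops of Source B: scan to the next marker (takeWhile/dropWhile on obNoMarker)
def obChunks : List String → List String
  | [] => []
  | l :: tail =>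
      PySem.Str.join "\n" (l :: tail.takeWhile obNoMarker)
        :: obChunks (tail.dropWhile obNoMarker)
termination_by ls => ls.length
decreasing_by
  simpa using Nat.lt_succ_of_le (List.length_dropWhile_le _ _)

def operators_generator_alt (_content : String) : List String :=
  let lines := (PySem.Str.split? _content "\n").getD []
  PySem.Str.join "\n" (lines.takeWhile obNoMarker) :: obChunks (lines.dropWhile obNoMarker)

-- ===== PRECONDITION & SPEC =====
def Spec_operators_generator (_content : String) (out : List String) : Prop := out = operators_generator_alt _content
instance (_content : String) (out : List String) : Decidable (Spec_operators_generator _content out) := by unfold Spec_operators_generator; infer_instance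

-- ===== CLAIM (what is proved, stated in full; the proofs are below) =====
def Claim_equal_operators_generator : Prop := ∀ (_content : String), Dom_operators_generator _content → Spec_operators_generator _content (operators_generator _content)

-- ===== LEMMAS AND PROOFS =====

lemma foldA_eq (ls : List String) : ∀ (temp out : List String),
    (ls.foldl oaStep (temp, out)).2 ++ [PySem.Str.join "\n" (ls.foldl oaStep (temp, out)).1]
      = out ++ (PySem.Str.join "\n" (temp ++ ls.takeWhile obNoMarker)
          :: obChunks (ls.dropWhile obNoMarker)) := by
  induction ls with
  | nil => intro temp out; simp [obChunks]
  | cons l rest ih =>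
    intro temp out
    by_cases h : PySem.Str.isIn "->" l = true
    · simp only [List.foldl_cons, oaStep, if_pos, List.takeWhile_cons,
        List.dropWhile_cons, obNoMarker, h, Bool.not_true, Bool.false_eq_true,
        reduceIte]
      rw [ih [l] (out ++ [PySem.Str.join "\n" temp])]
      simp [obChunks]
    · have hx : PySem.Str.isIn "->" l = false := Bool.eq_false_iff.mpr h
      have h' : obNoMarker l = true := by unfold obNoMarker; rw [hx]; rfl
      simp only [List.foldl_cons, oaStep, h, Bool.false_eq_true, reduceIte,
        List.takeWhile_cons, List.dropWhile_cons, h', if_pos]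
      rw [ih (temp ++ [l]) out]
      simp

-- ===== VERDICT (by name: the statement is the Claim_ definition above) =====
theorem operators_generator_spec : Claim_equal_operators_generator := by
  intro c _
  unfold Spec_operators_generator operators_generator operators_generator_alt
  simpa using foldA_eq ((PySem.Str.split? c "\n").getD []) [] []
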